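-- pv_equiv track=rewrite | github.com/Yujun-Won/codetree-TILs | 231111/함수를 이용한 369 게임/369-games-using-functions.py | is_magic_number
-- ===== SOURCE A (Python) =====
-- def is_magic_number(a, b):
--     cnt = 0
--     # 1. a이상 b이하 수들 중 3, 6, 9 중에 하나가 들어가 있거나
--     for i in range(a, b+1):
--         cnt3 = str(i).count('3')
--         cnt6 = str(i).count('6')
--         cnt9 = str(i).count('9')
--
--         # 2. 그 숫자 자체가 3의 배수인 숫자의 개수
--         if cnt3 + cnt6 + cnt9 > 0 or i % 3 == 0:
--             cnt += 1
--
--     return cnt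
-- ===== SOURCE B (Python) =====
-- def _ok(n):
--     # True iff the decimal digits of n (n >= 0) avoid 3, 6 and 9
--     while n > 0:
--         if n % 10 in (3, 6, 9):
--             return False
--         n //= 10
--     return True
--
--
-- def _cvec(n):
--     # counts, by residue mod 3, of the i in [0..n] whose digits avoid 3/6/9
--     if n < 10:
--         c = [0, 0, 0]
--         for d in range(n + 1):
--             if d not in (3, 6, 9):
--                 c[d % 3] += 1
--         return c
--     q, r = n // 10, n % 10
--     g = _cvec(q - 1)
--     # i = 10*j + d with j < q, d any allowed digit: (10j+d) % 3 == (j+d) % 3,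
--     # and among allowed digits one is ≡0 and three each are ≡1, ≡2 (mod 3)
--     full = [g[m] + 3 * g[(m - 1) % 3] + 3 * g[(m - 2) % 3] for m in range(3)]
--     if _ok(q):
--         for d in range(r + 1):
--             if d not in (3, 6, 9):
--                 full[(q % 3 + d) % 3] += 1
--     return full
--
--
-- def _prefix(x):
--     # number of magic i in [0..x] for x >= 0; for x < 0, 1 - (magic count in [0..-x-1])
--     if x >= 0:
--         c = _cvec(x)
--         return (x + 1) - c[1] - c[2]
--     y = -x - 1
--     c = _cvec(y)
--     return 1 - ((y + 1) - c[1] - c[2])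
--
--
-- def is_magic_number(a, b):
--     if a > b:
--         return 0
--     return _prefix(b) - _prefix(a - 1)
-- ===== Notes on version B (the rewrite author's own statement) =====
-- stated objective: faster
-- what changed: Replaces the per-number scan of [a,b] by a digit-DP prefix count: _cvec(n) computes, by residue mod 3, how many i in [0..n] avoid the digits 3/6/9 via the decomposition i = 10*j + d, and the answer is prefix(b) - prefix(a-1) (extended to negatives by digit symmetry).
import Mathlib
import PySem

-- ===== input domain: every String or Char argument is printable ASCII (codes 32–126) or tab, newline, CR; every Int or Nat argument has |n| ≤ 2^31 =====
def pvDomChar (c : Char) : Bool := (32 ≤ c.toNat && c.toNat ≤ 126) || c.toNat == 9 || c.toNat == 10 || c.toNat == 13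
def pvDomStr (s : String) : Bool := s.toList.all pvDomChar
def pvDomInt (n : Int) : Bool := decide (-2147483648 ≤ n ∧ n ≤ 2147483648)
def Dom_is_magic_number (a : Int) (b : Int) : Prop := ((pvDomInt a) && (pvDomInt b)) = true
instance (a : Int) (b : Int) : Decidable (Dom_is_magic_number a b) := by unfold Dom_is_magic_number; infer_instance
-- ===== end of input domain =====

-- B replaces A's per-number scan of [a, b] by a digit-DP prefix count, answer = prefix(b) - prefix(a-1); A = B is proved on all inputs.

-- ===== PORT A =====
def is_magic_number (a : Int) (b : Int) : Int :=
  (PySem.List.pyRange a (b + 1) 1).foldl (fun cnt i =>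
    let cnt3 := PySem.Str.count (PySem.Int.toStr i) "3"
    let cnt6 := PySem.Str.count (PySem.Int.toStr i) "6"
    let cnt9 := PySem.Str.count (PySem.Int.toStr i) "9"
    if cnt3 + cnt6 + cnt9 > 0 ∨ PySem.Int.mod i 3 = 0 then cnt + 1 else cnt) 0

-- ===== PORT B =====
def pvAllowed (d : Nat) : Bool := !(d == 3 || d == 6 || d == 9)

-- _ok(n): digits of n avoid 3/6/9 (Source B's while loop as recursion on n // 10)
def pvOk (n : Nat) : Bool :=
  if h : n = 0 then true
  else if pvAllowed (n % 10) then pvOk (n / 10) else false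
decreasing_by exact Nat.div_lt_self (Nat.pos_of_ne_zero h) (by omega)

-- c[m] += 1 on the triple standing for Source B's 3-element list
def pvBump (c : Int × Int × Int) (m : Nat) : Int × Int × Int :=
  if m = 0 then (c.1 + 1, c.2.1, c.2.2)
  else if m = 1 then (c.1, c.2.1 + 1, c.2.2)
  else (c.1, c.2.1, c.2.2 + 1)

-- g[m] of Source B's list
def pvGetc (c : Int × Int × Int) (m : Nat) : Int :=
  if m = 0 then c.1 else if m = 1 then c.2.1 else c.2.2

-- full[m] = g[m] + 3*g[(m-1)%3] + 3*g[(m-2)%3] (Source B's comprehension, written out for m = 0, 1, 2)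
def pvFull (g : Int × Int × Int) : Int × Int × Int :=
  (pvGetc g 0 + 3 * pvGetc g 2 + 3 * pvGetc g 1,
   pvGetc g 1 + 3 * pvGetc g 0 + 3 * pvGetc g 2,
   pvGetc g 2 + 3 * pvGetc g 1 + 3 * pvGetc g 0)

-- _cvec(n); q = n / 10 and r = n % 10 are written inline
def pvCvec (n : Nat) : Int × Int × Int :=
  if n < 10 then
    (List.range (n + 1)).foldl (fun c d => if pvAllowed d then pvBump c (d % 3) else c) (0, 0, 0)
  else
    if pvOk (n / 10) then
      (List.range (n % 10 + 1)).foldl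
        (fun c d => if pvAllowed d then pvBump c ((n / 10 % 3 + d) % 3) else c)
        (pvFull (pvCvec (n / 10 - 1)))
    else pvFull (pvCvec (n / 10 - 1))
decreasing_by
  all_goals
    have : n / 10 < n := Nat.div_lt_self (by omega) (by omega)
    omega

-- _prefix(x)
def pvPrefix (x : Int) : Int :=
  if x ≥ 0 then
    let c := pvCvec x.toNat
    (x + 1) - c.2.1 - c.2.2
  else
    let y := (-x - 1).toNat
    let c := pvCvec y
    1 - (((y : Int) + 1) - c.2.1 - c.2.2)

def is_magic_number_alt (a : Int) (b : Int) : Int :=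
  if a > b then 0 else pvPrefix b - pvPrefix (a - 1)

-- ===== PRECONDITION & SPEC =====
def Spec_is_magic_number (a : Int) (b : Int) (out : Int) : Prop := out = is_magic_number_alt a b
instance (a : Int) (b : Int) (out : Int) : Decidable (Spec_is_magic_number a b out) := by unfold Spec_is_magic_number; infer_instance

-- ===== CLAIM (what is proved, stated in full; the proofs are below) =====
def Claim_equal_is_magic_number : Prop := ∀ (a : Int) (b : Int), Dom_is_magic_number a b → Spec_is_magic_number a b (is_magic_number a b)

-- ===== LEMMAS AND PROOFS =====

def pvRep (n : Nat) : List Char :=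
  if n < 10 then [Nat.digitChar n]
  else pvRep (n / 10) ++ [Nat.digitChar (n % 10)]
decreasing_by exact Nat.div_lt_self (by omega) (by omega)

lemma pvToDigitsCore_eq : ∀ (fuel n : Nat) (ds : List Char), n < fuel →
    Nat.toDigitsCore 10 fuel n ds = pvRep n ++ ds := by
  intro fuel
  induction fuel with
  | zero => omega
  | succ f ih =>
    intro n ds h
    rw [Nat.toDigitsCore]
    by_cases h0 : n / 10 = 0
    · have hn : n < 10 := by omega
      simp only [h0, if_pos rfl]
      rw [pvRep]
      simp [if_pos hn, Nat.mod_eq_of_lt hn]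
    · simp only [if_neg h0]
      rw [ih (n / 10) _ (by omega)]
      have hn : ¬ n < 10 := by omega
      conv_rhs => rw [pvRep]
      simp [if_neg hn]

lemma pvToChars_nonneg (n : Nat) : PySem.Int.toChars (n : Int) = pvRep n := by
  have h1 : ¬ ((n : Int) < 0) := by omega
  simp only [PySem.Int.toChars, if_neg h1, Int.toNat_natCast, Nat.toDigits]
  rw [pvToDigitsCore_eq _ _ _ (by omega)]
  simp

lemma pvToChars_neg (n : Nat) (h : 0 < n) : PySem.Int.toChars (-(n : Int)) = '-' :: pvRep n := by
  have : (-(n : Int)) < 0 := by omega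
  simp only [PySem.Int.toChars, if_pos this, Nat.toDigits]
  rw [pvToDigitsCore_eq _ _ _ (by omega)]
  simp

lemma pvCountGo (c : Char) : ∀ (fuel : Nat) (s : List Char) (acc : Nat), s.length ≤ fuel →
    PySem.Chars.count.go [c] fuel s acc = acc + s.count c := by
  intro fuel
  induction fuel with
  | zero =>
    intro s acc h
    have : s = [] := by cases s <;> simp_all
    subst this
    simp [PySem.Chars.count.go]
  | succ f ih =>
    intro s acc h
    match s with
    | [] => simp [PySem.Chars.count.go]
    | hd :: t =>
      rw [PySem.Chars.count.go]
      by_cases hc : c = hd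
      · subst hc
        have hp : List.isPrefixOf [c] (c :: t) = true := by simp [List.isPrefixOf]
        simp only [hp, if_pos]
        simp only [List.length_singleton, List.drop_one, List.tail_cons]
        rw [ih t (acc + 1) (by simpa using h)]
        simp [List.count_cons]
        omega
      · have hp : List.isPrefixOf [c] (hd :: t) = false := by
          simpa [List.isPrefixOf] using hc
        simp only [hp]
        simp only [Bool.false_eq_true, if_neg]
        rw [ih t acc (by simpa using h)]
        simp [List.count_cons]
        intro hh; exact (hc hh.symm).elim

lemma pvStrCount (s : List Char) (c : Char) : PySem.Chars.count s [c] = s.count c := by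
  rw [PySem.Chars.count]
  simp only [List.isEmpty_cons, Bool.false_eq_true, if_neg]
  simpa using pvCountGo c s.length s 0 (le_refl _)

def pv369 (s : List Char) : Nat := s.count '3' + s.count '6' + s.count '9'

def pvMagicN (i : Nat) : Bool := !pvOk i || i % 3 == 0
def pvMagicI (i : Int) : Bool := pvMagicN i.natAbs

lemma pvOk_small (d : Nat) (hd : d < 10) : pvOk d = pvAllowed d := by
  rw [pvOk]
  by_cases h0 : d = 0
  · subst h0; simp [pvAllowed]
  · rw [dif_neg h0]
    have h1 : d % 10 = d := Nat.mod_eq_of_lt hd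
    have h2 : d / 10 = 0 := Nat.div_eq_of_lt hd
    rw [h1, h2, pvOk]
    simp only [dif_pos rfl]
    cases h : pvAllowed d <;> simp [h]

lemma pv369_digit (d : Nat) (hd : d < 10) :
    (pv369 [Nat.digitChar d] = 0) = (pvAllowed d = true) := by
  interval_cases d <;> simp [pv369, pvAllowed] <;> decide

lemma pv369_append (s t : List Char) : pv369 (s ++ t) = pv369 s + pv369 t := by
  simp [pv369]; omega

lemma pvOk_iff (n : Nat) : (pvOk n = true) = (pv369 (pvRep n) = 0) := by
  induction n using Nat.strong_induction_on with
  | _ n ih =>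
    by_cases h : n < 10
    · rw [pvRep, if_pos h, pvOk_small n h, pv369_digit n h]
    · rw [pvRep, if_neg h, pv369_append, pvOk]
      rw [dif_neg (by omega)]
      have hd : n % 10 < 10 := Nat.mod_lt _ (by omega)
      have := ih (n / 10) (Nat.div_lt_self (by omega) (by omega))
      by_cases ha : pvAllowed (n % 10)
      · rw [if_pos ha, this]
        have h369 : pv369 [Nat.digitChar (n % 10)] = 0 := by rw [pv369_digit _ hd]; exact ha
        simp [h369]
      · rw [if_neg ha]
        have h369 : pv369 [Nat.digitChar (n % 10)] ≠ 0 := by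
          rw [← pv369_digit _ hd] at ha; omega
        simp; omega

lemma pvCondA (i : Int) :
    (0 < PySem.Str.count (PySem.Int.toStr i) "3" + PySem.Str.count (PySem.Int.toStr i) "6"
       + PySem.Str.count (PySem.Int.toStr i) "9"
      ∨ PySem.Int.mod i 3 = 0) ↔ pvMagicI i = true := by
  have hmod : PySem.Int.mod i 3 = 0 ↔ i.natAbs % 3 = 0 := by
    rw [PySem.Int.mod_eq_zero_iff_dvd]
    rw [← Int.natAbs_dvd_natAbs]
    simp [Nat.dvd_iff_mod_eq_zero]
  have hcnt : PySem.Str.count (PySem.Int.toStr i) "3" + PySem.Str.count (PySem.Int.toStr i) "6"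
       + PySem.Str.count (PySem.Int.toStr i) "9" = pv369 (PySem.Int.toChars i) := by
    simp only [PySem.Str.count_eq, PySem.Int.toList_toStr]
    have h3 : "3".toList = ['3'] := rfl
    have h6 : "6".toList = ['6'] := rfl
    have h9 : "9".toList = ['9'] := rfl
    rw [h3, h6, h9, pvStrCount, pvStrCount, pvStrCount]
    rfl
  have hrep : pv369 (PySem.Int.toChars i) = pv369 (pvRep i.natAbs) := by
    obtain ⟨n, rfl | rfl⟩ := Int.eq_nat_or_neg i
    · rw [pvToChars_nonneg]; simp
    · by_cases h0 : n = 0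
      · subst h0; norm_num
        have := pvToChars_nonneg 0
        norm_num at this
        rw [this]
      · rw [pvToChars_neg _ (by omega)]
        simp [pv369, List.count_cons]
  rw [hcnt, hrep, hmod]
  unfold pvMagicI pvMagicN
  have hok := pvOk_iff i.natAbs
  cases h : pvOk i.natAbs
  · rw [h] at hok
    have h2 : pv369 (pvRep i.natAbs) ≠ 0 := by
      intro hz; rw [hz] at hok; simp at hok
    simp [h]
    omega
  · rw [h] at hok
    have h2 : pv369 (pvRep i.natAbs) = 0 := by rw [← hok]
    simp [h, h2]

def pvG (m q : Nat) : Nat := (List.range q).countP (fun i => pvOk i && i % 3 == m)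
def pvM (q : Nat) : Nat := (List.range q).countP (fun i => pvMagicN i)

lemma pvG_succ (m q : Nat) :
    pvG m (q + 1) = pvG m q + (if pvOk q && q % 3 == m then 1 else 0) := by
  simp only [pvG, List.range_succ, List.countP_append, List.countP_cons, List.countP_nil]
  cases h : (pvOk q && q % 3 == m) <;> simp [h]

lemma pvM_succ (q : Nat) :
    pvM (q + 1) = pvM q + (if pvMagicN q then 1 else 0) := by
  simp only [pvM, List.range_succ, List.countP_append, List.countP_cons, List.countP_nil]
  cases h : pvMagicN q <;> simp [h]

lemma pvTriple (q : Nat) : pvG 1 q + pvG 2 q + pvM q = q := by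
  induction q with
  | zero => simp [pvG, pvM]
  | succ q ih =>
    rw [pvG_succ, pvG_succ, pvM_succ]
    unfold pvMagicN
    have h3 : q % 3 = 0 ∨ q % 3 = 1 ∨ q % 3 = 2 := by omega
    cases h : pvOk q <;> rcases h3 with h3 | h3 | h3 <;> (simp [h, h3]; try omega)

lemma pvOk_tenmul (q d : Nat) (hd : d < 10) : pvOk (10 * q + d) = (pvAllowed d && pvOk q) := by
  by_cases hq : q = 0
  · subst hq
    simp only [Nat.mul_zero, Nat.zero_add]
    rw [pvOk_small d hd, pvOk]
    simp [Bool.and_comm]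
  · rw [pvOk]
    rw [dif_neg (by omega)]
    have h1 : (10 * q + d) % 10 = d := by omega
    have h2 : (10 * q + d) / 10 = q := by omega
    rw [h1, h2]
    cases h : pvAllowed d <;> simp [h]

lemma pvG_blocks (m : Nat) (hm : m < 3) (q : Nat) :
    pvG m (10 * q) = pvG m q + 3 * pvG ((m + 1) % 3) q + 3 * pvG ((m + 2) % 3) q := by
  induction q with
  | zero => simp [pvG]
  | succ q ih =>
    have hsplit : 10 * (q + 1) = 10 * q + 10 := by ring
    rw [hsplit]
    have hstep : pvG m (10 * q + 10) = pvG m (10 * q) +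
        (List.range 10).countP ((fun i => pvOk i && i % 3 == m) ∘ (10 * q + ·)) := by
      unfold pvG
      rw [List.range_add, List.countP_append, List.countP_map]
    have hinner : (List.range 10).countP ((fun i => pvOk i && i % 3 == m) ∘ (10 * q + ·)) =
        if pvOk q then (if q % 3 = m then 1 else 3) else 0 := by
      have hc : ∀ d ∈ List.range 10,
          (((fun i => pvOk i && i % 3 == m) ∘ (10 * q + ·)) d = true ↔
          (fun d => pvAllowed d && pvOk q && (q % 3 + d) % 3 == m) d = true) := by
        intro d hdm
        have hd : d < 10 := by simpa using hdm
        simp only [Function.comp]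
        rw [pvOk_tenmul q d hd]
        have he : (10 * q + d) % 3 = (q % 3 + d) % 3 := by omega
        rw [he]
      rw [List.countP_congr hc]
      have h3 : q % 3 = 0 ∨ q % 3 = 1 ∨ q % 3 = 2 := by omega
      cases h : pvOk q <;> rcases h3 with h3 | h3 | h3 <;>
          interval_cases m <;> (simp [h, h3]; try decide)
    rw [hstep, hinner, ih, pvG_succ, pvG_succ, pvG_succ]
    have h3 : q % 3 = 0 ∨ q % 3 = 1 ∨ q % 3 = 2 := by omega
    cases h : pvOk q <;> rcases h3 with h3 | h3 | h3 <;>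
        interval_cases m <;> (simp [h, h3]; try omega)

lemma pvFoldlBump (f : Nat → Nat) (P : Nat → Bool) (l : List Nat) (hf : ∀ d ∈ l, f d < 3) :
    ∀ c0 : Int × Int × Int,
    l.foldl (fun c d => if P d then pvBump c (f d) else c) c0 =
      (c0.1 + (l.countP (fun d => P d && f d == 0) : Int),
       c0.2.1 + (l.countP (fun d => P d && f d == 1) : Int),
       c0.2.2 + (l.countP (fun d => P d && f d == 2) : Int)) := by
  induction l with
  | nil => intro c0; simp
  | cons d t ih =>
    intro c0
    have hd : f d < 3 := hf d (by simp)
    have ht : ∀ x ∈ t, f x < 3 := fun x hx => hf x (by simp [hx])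
    simp only [List.foldl_cons]
    rw [ih ht]
    simp only [List.countP_cons]
    have h3 : f d = 0 ∨ f d = 1 ∨ f d = 2 := by omega
    cases hP : P d <;> rcases h3 with h | h | h <;> simp [pvBump, hP, h] <;> omega

lemma pvCvec_eq (n : Nat) :
    pvCvec n = ((pvG 0 (n + 1) : Int), (pvG 1 (n + 1) : Int), (pvG 2 (n + 1) : Int)) := by
  induction n using Nat.strong_induction_on with
  | _ n ih =>
    rw [pvCvec]
    by_cases h : n < 10
    · rw [if_pos h]
      rw [pvFoldlBump (· % 3) pvAllowed _ (fun d _ => Nat.mod_lt _ (by omega))]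
      have hc : ∀ m : Nat, (List.range (n + 1)).countP (fun d => pvAllowed d && d % 3 == m) =
          pvG m (n + 1) := by
        intro m
        unfold pvG
        apply List.countP_congr
        intro d hdm
        have hd : d < 10 := by simp at hdm; omega
        rw [pvOk_small d hd]
      simp [hc]
    · rw [if_neg h]
      have hq1 : 1 ≤ n / 10 := by omega
      have hqlt : n / 10 - 1 < n := by
        have : n / 10 < n := Nat.div_lt_self (by omega) (by omega)
        omega
      have hqeq : n / 10 - 1 + 1 = n / 10 := by omega
      have hg : pvFull (pvCvec (n / 10 - 1)) =
          ((pvG 0 (n / 10) : Int) + 3 * pvG 2 (n / 10) + 3 * pvG 1 (n / 10),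
           (pvG 1 (n / 10) : Int) + 3 * pvG 0 (n / 10) + 3 * pvG 2 (n / 10),
           (pvG 2 (n / 10) : Int) + 3 * pvG 1 (n / 10) + 3 * pvG 0 (n / 10)) := by
        rw [ih (n / 10 - 1) hqlt, hqeq]
        simp [pvFull, pvGetc]
      have hn : n + 1 = 10 * (n / 10) + (n % 10 + 1) := by omega
      have hblocks := fun (m : Nat) (hm : m < 3) => pvG_blocks m hm (n / 10)
      have hsplitG : ∀ m : Nat, pvG m (n + 1) = pvG m (10 * (n / 10)) +
          (List.range (n % 10 + 1)).countP ((fun i => pvOk i && i % 3 == m) ∘ (10 * (n / 10) + ·)) := by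
        intro m
        unfold pvG
        rw [hn, List.range_add, List.countP_append, List.countP_map]
      have htail : ∀ m : Nat, (List.range (n % 10 + 1)).countP ((fun i => pvOk i && i % 3 == m) ∘ (10 * (n / 10) + ·)) =
          if pvOk (n / 10) then (List.range (n % 10 + 1)).countP (fun d => pvAllowed d && (n / 10 % 3 + d) % 3 == m) else 0 := by
        intro m
        have hc : ∀ d ∈ List.range (n % 10 + 1),
            (((fun i => pvOk i && i % 3 == m) ∘ (10 * (n / 10) + ·)) d = true ↔
            (fun d => pvOk (n / 10) && (pvAllowed d && (n / 10 % 3 + d) % 3 == m)) d = true) := by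
          intro d hdm
          have hd : d < 10 := by simp at hdm; omega
          simp only [Function.comp]
          rw [pvOk_tenmul (n / 10) d hd]
          have he : (10 * (n / 10) + d) % 3 = (n / 10 % 3 + d) % 3 := by omega
          rw [he]
          cases pvAllowed d <;> cases pvOk (n / 10) <;> simp
        rw [List.countP_congr hc]
        cases hok : pvOk (n / 10)
        · simp
        · apply List.countP_congr
          intro d hdm
          simp
      by_cases hok : pvOk (n / 10)
      · rw [if_pos hok]
        rw [hg]
        rw [pvFoldlBump (fun d => (n / 10 % 3 + d) % 3) pvAllowed _ (fun d _ => Nat.mod_lt _ (by omega))]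
        have hm3 : ∀ (x : Nat) (hx : x < 3), (fun d => pvAllowed d && (n / 10 % 3 + d) % 3 == x) = (fun d => pvAllowed d && decide ((n / 10 % 3 + d) % 3 = x)) := by
          intro x hx; rfl
        refine Prod.ext ?_ (Prod.ext ?_ ?_) <;>
          · simp only []
            rw [hsplitG, htail, hblocks _ (by omega), if_pos hok]
            push_cast
            ring
      · rw [if_neg hok]
        rw [hg]
        refine Prod.ext ?_ (Prod.ext ?_ ?_) <;>
          · simp only []
            rw [hsplitG, htail, hblocks _ (by omega), if_neg hok]
            push_cast
            ring

lemma pvPrefix_nonneg (n : Nat) : pvPrefix (n : Int) = pvM (n + 1) := by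
  have h0 : ((n : Int) ≥ 0) := by omega
  rw [pvPrefix, if_pos h0]
  simp only [Int.toNat_natCast]
  rw [pvCvec_eq]
  have := pvTriple (n + 1)
  push_cast
  omega

lemma pvPrefix_neg (n : Nat) (h : 0 < n) : pvPrefix (-(n : Int)) = 1 - pvM n := by
  have h0 : ¬ ((-(n : Int)) ≥ 0) := by omega
  rw [pvPrefix, if_neg h0]
  simp only []
  have hy : (-(-(n : Int)) - 1).toNat = n - 1 := by omega
  rw [hy, pvCvec_eq]
  have hn1 : n - 1 + 1 = n := by omega
  rw [hn1]
  have := pvTriple n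
  push_cast
  omega

lemma pvPrefix_step (x : Int) : pvPrefix x = pvPrefix (x - 1) + (if pvMagicI x then 1 else 0) := by
  rcases lt_trichotomy x 0 with hx | hx | hx
  · obtain ⟨n, hn, rfl⟩ : ∃ n : Nat, 0 < n ∧ x = -(n : Int) := ⟨x.natAbs, by omega, by omega⟩
    rw [pvPrefix_neg n hn]
    have h1 : (-(n : Int)) - 1 = -((n + 1 : Nat) : Int) := by push_cast; ring
    rw [h1, pvPrefix_neg (n + 1) (by omega)]
    rw [pvM_succ]
    have hmag : pvMagicI (-(n : Int)) = pvMagicN n := by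
      unfold pvMagicI; congr 1; try omega
    rw [hmag]
    cases pvMagicN n <;> (simp; try omega)
  · subst hx
    rw [show ((0 : Int)) = ((0 : Nat) : Int) by rfl, pvPrefix_nonneg]
    rw [show ((0 : Nat) : Int) - 1 = -((1 : Nat) : Int) by push_cast; try ring]
    rw [pvPrefix_neg 1 (by omega)]
    have hok0 : pvOk 0 = true := by rw [pvOk]; simp
    have hm0 : pvMagicN 0 = true := by unfold pvMagicN; simp
    have h1 : pvM 1 = 1 := by rw [show (1 : Nat) = 0 + 1 by rfl, pvM_succ, hm0]; simp [pvM]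
    have hI : pvMagicI ((0 : Nat) : Int) = true := by unfold pvMagicI; simpa using hm0
    rw [h1, hI]
    simp
  · obtain ⟨m, rfl⟩ : ∃ m : Nat, x = ((m + 1 : Nat) : Int) := ⟨x.toNat - 1, by omega⟩
    rw [pvPrefix_nonneg]
    rw [show ((m + 1 : Nat) : Int) - 1 = ((m : Nat) : Int) by push_cast; ring, pvPrefix_nonneg]
    rw [pvM_succ]
    have hmag : pvMagicI ((m + 1 : Nat) : Int) = pvMagicN (m + 1) := by
      unfold pvMagicI; congr 1; try omega
    rw [hmag]
    cases pvMagicN (m + 1) <;> (simp; try omega)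

lemma pvSum : ∀ (k : Nat) (a b : Int), b + 1 - a = k →
    (((PySem.List.pyRange a (b + 1) 1).countP pvMagicI : Nat) : Int) = pvPrefix b - pvPrefix (a - 1) := by
  intro k
  induction k with
  | zero =>
    intro a b hk
    have h1 : b + 1 ≤ a := by omega
    rw [PySem.List.pyRange_one_eq_nil h1]
    have h2 : b = a - 1 := by omega
    subst h2
    simp
  | succ k ih =>
    intro a b hk
    have hab : a ≤ b := by omega
    rw [PySem.List.pyRange_one_succ_right hab, List.countP_append]
    have hih := ih a (b - 1) (by omega)
    rw [show b - 1 + 1 = b from by ring] at hih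
    push_cast
    rw [hih]
    have hstep := pvPrefix_step b
    rw [show b - 1 = b - 1 from rfl] at hstep
    cases hm : pvMagicI b <;> rw [hm] at hstep <;> rw [hstep] <;> (simp [hm]; try ring; try omega)

lemma pvASide (a b : Int) : is_magic_number a b =
    (((PySem.List.pyRange a (b + 1) 1).countP pvMagicI : Nat) : Int) := by
  have h1 : is_magic_number a b = (PySem.List.pyRange a (b + 1) 1).foldl (fun cnt i =>
      if (0 < PySem.Str.count (PySem.Int.toStr i) "3" + PySem.Str.count (PySem.Int.toStr i) "6"
          + PySem.Str.count (PySem.Int.toStr i) "9" ∨ PySem.Int.mod i 3 = 0) then cnt + 1 else cnt) 0 := rfl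
  rw [h1, PySem.List.foldl_ite_add_one]
  rw [zero_add]
  congr 1
  apply List.countP_congr
  intro x _
  simp only [decide_eq_true_eq]
  exact pvCondA x


lemma pvFinal (a b : Int) : is_magic_number a b = if a > b then 0 else pvPrefix b - pvPrefix (a - 1) := by
  by_cases hab : a > b
  · rw [if_pos hab, pvASide, PySem.List.pyRange_one_eq_nil (by omega)]
    simp
  · rw [if_neg hab, pvASide]
    exact pvSum (b + 1 - a).toNat a b (by omega)


-- ===== VERDICT (by name: the statement is the Claim_ definition above) =====
theorem is_magic_number_spec : Claim_equal_is_magic_number := by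
  intro a b _
  unfold Spec_is_magic_number is_magic_number_alt
  exact pvFinal a b
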